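-- pv_equiv track=rewrite | github.com/a1ip/my_check | swapsort.py | swapsort
-- ===== SOURCE A (Python) =====
-- def swapsort(rods):
--     rods = list(rods)
--     i = 0
--     res = []
--     while i < len(rods) - 1:
--         if rods[i] > rods[i+1]:
--             res.append(str(i)+str(i+1))
--             rods[i], rods[i+1] = rods[i+1], rods[i]
--         else:
--             i +=1
--     res = ",".join(res)
--     if sorted(rods) == rods:
--         return res
--     else:
--         return res + "," + swapsort(rods)
-- ===== SOURCE B (Python) =====
-- def swapsort(rods):
--     # one bubble pass, as structural recursion on the list (no in-place swaps):
--     # returns (list after the pass, tokens emitted during the pass)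
--     def sweep(lst, i):
--         if len(lst) < 2:
--             return lst, []
--         a, b = lst[0], lst[1]
--         if a > b:
--             tail, toks = sweep([a] + lst[2:], i + 1)
--             return [b] + tail, [str(i) + str(i + 1)] + toks
--         tail, toks = sweep(lst[1:], i + 1)
--         return [a] + tail, toks
--
--     cur = list(rods)
--     all_toks = []
--     while True:
--         cur, toks = sweep(cur, 0)
--         if not toks:
--             break
--         all_toks += toks
--     return ",".join(all_toks)
-- ===== Notes on version B (the rewrite author's own statement) =====
-- stated objective: alternative
-- what changed: Replaces A's in-place indexed sweep (while-loop with swaps via assignment, staying at i after a swap) and its recursion over passes with per-pass join and string concatenation by a purely functional head-recursive sweep over the list plus an iterative outer loop that stops when a sweep emits no token and joins a single token list once.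
import Mathlib
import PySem

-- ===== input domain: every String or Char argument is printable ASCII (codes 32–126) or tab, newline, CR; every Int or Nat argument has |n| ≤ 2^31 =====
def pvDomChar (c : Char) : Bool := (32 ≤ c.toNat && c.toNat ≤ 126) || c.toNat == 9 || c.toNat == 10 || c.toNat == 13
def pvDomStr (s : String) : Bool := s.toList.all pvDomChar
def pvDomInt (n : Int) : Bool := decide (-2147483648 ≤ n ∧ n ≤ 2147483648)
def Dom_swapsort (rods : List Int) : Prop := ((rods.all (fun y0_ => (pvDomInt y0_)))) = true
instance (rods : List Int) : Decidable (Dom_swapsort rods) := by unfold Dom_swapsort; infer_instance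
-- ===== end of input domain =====

-- B replaces A's in-place indexed sweep + recursion over passes (with per-pass
-- join and string concatenation) by a purely functional head-recursive sweep
-- over the list and an iterative outer loop that stops when a sweep emits no
-- token, joining one token list once (objective: alternative decomposition).

-- ===== PORT A =====
-- A's inner `while i < len(rods)-1` loop: index-based, swaps in place (two
-- List.set), stays at i after a swap.  The Nat fuel only makes the loop total:
-- one unit per iteration; the loop runs at most 2*len iterations (i never
-- decreases and at most one swap happens at a position before i advances), so
-- fuel 2*len+1 is never exhausted.  `rods.getD i 0` / `rods.getD (i+1) 0`
-- port rods[i] / rods[i+1], exact here because the guard gives i+1 < length.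
def pvSweep : Nat → List Int → Nat → List String → List Int × List String
  | 0, rods, _, res => (rods, res)
  | f+1, rods, i, res =>
    if i < rods.length - 1 then
      if rods.getD (i+1) 0 < rods.getD i 0 then
        pvSweep f ((rods.set i (rods.getD (i+1) 0)).set (i+1) (rods.getD i 0)) i
          (res ++ [PySem.Int.toStr (i : Int) ++ PySem.Int.toStr ((i : Int) + 1)])
      else
        pvSweep f rods (i+1) res
    else (rods, res)

-- A's recursion over passes; the outer fuel only makes the recursion total
-- (bubble sort needs at most rods.length passes, so len*len+1 is never
-- exhausted; the fuel-0 arm returns the current pass's join without recursing).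
def pvGoA : Nat → List Int → String
  | 0, rods => PySem.Str.join "," (pvSweep (2 * rods.length + 1) rods 0 []).2
  | f+1, rods =>
    let r := pvSweep (2 * rods.length + 1) rods 0 []
    let res := PySem.Str.join "," r.2
    if PySem.List.sorted r.1 (fun x => x) = r.1 then res
    else res ++ "," ++ pvGoA f r.1

def swapsort (rods : List Int) : String :=
  pvGoA (rods.length * rods.length + 1) rods

-- ===== PORT B =====
-- B's `sweep(lst, i)`: structural recursion on the list, no indexing and no
-- in-place update; returns (list after the pass, tokens of the pass).
def pvSweepB : List Int → Nat → List Int × List String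
  | a :: b :: rest, i =>
    if b < a then
      let r := pvSweepB (a :: rest) (i+1)
      (b :: r.1, (PySem.Int.toStr (i : Int) ++ PySem.Int.toStr ((i : Int) + 1)) :: r.2)
    else
      let r := pvSweepB (b :: rest) (i+1)
      (a :: r.1, r.2)
  | l, _ => (l, [])
termination_by l _ => l.length

-- B's `while True` loop: stop as soon as a sweep yields no token, extend the
-- single token list otherwise; one final join.  Fuel only for totality: the
-- loop runs (number of swapping passes)+1 ≤ len+1 times, so len*len+2 is
-- never exhausted.
def pvGoB : Nat → List Int → List String → String
  | 0, _, acc => PySem.Str.join "," acc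
  | f+1, cur, acc =>
    let r := pvSweepB cur 0
    if r.2 = [] then PySem.Str.join "," acc
    else pvGoB f r.1 (acc ++ r.2)

def swapsort_alt (rods : List Int) : String :=
  pvGoB (rods.length * rods.length + 2) rods []

-- ===== PRECONDITION & SPEC =====
def Spec_swapsort (rods : List Int) (out : String) : Prop := out = swapsort_alt rods
instance (rods : List Int) (out : String) : Decidable (Spec_swapsort rods out) := by unfold Spec_swapsort; infer_instance

-- ===== CLAIM (what is proved, stated in full; the proofs are below) =====
def Claim_equal_swapsort : Prop := ∀ (rods : List Int), Dom_swapsort rods → Spec_swapsort rods (swapsort rods)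

-- ===== LEMMAS AND PROOFS =====

-- join equations at the String level
theorem pvJoin_cons_cons (x y : String) (t : List String) :
    PySem.Str.join "," (x :: y :: t) = x ++ "," ++ PySem.Str.join "," (y :: t) := by
  apply String.toList_injective
  simp [PySem.Str.join, PySem.Chars.join_cons_cons, String.toList_append, String.toList_ofList]

theorem pvJoin_append (acc p : List String) (hacc : acc ≠ []) (hp : p ≠ []) :
    PySem.Str.join "," (acc ++ p) =
      PySem.Str.join "," acc ++ "," ++ PySem.Str.join "," p := by
  induction acc with
  | nil => exact absurd rfl hacc
  | cons a t ih =>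
    cases t with
    | nil =>
      cases p with
      | nil => exact absurd rfl hp
      | cons q qs => simp [PySem.Str.join, PySem.Chars.join_singleton]
                     exact (pvJoin_cons_cons a q qs)
    | cons b bs =>
      have h1 : (a :: b :: bs) ++ p = a :: b :: (bs ++ p) := rfl
      rw [h1, pvJoin_cons_cons, pvJoin_cons_cons a b bs]
      have h2 : b :: (bs ++ p) = (b :: bs) ++ p := rfl
      rw [h2, ih (by simp)]
      simp [String.append_assoc]

-- accumulator lemma for A's sweep: tokens are only ever appended
theorem pvSweep_acc (f : Nat) (rods : List Int) (i : Nat) (res : List String) :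
    pvSweep f rods i res = ((pvSweep f rods i []).1, res ++ (pvSweep f rods i []).2) := by
  induction f generalizing rods i res with
  | zero => simp [pvSweep]
  | succ f ih =>
    simp only [pvSweep]
    split
    · split
      · rw [ih _ _ (res ++ _), ih _ _ ([] ++ _)]
        simp
      · rw [ih rods (i+1) res, ih rods (i+1) []]
    · simp

theorem pvGetD_append (pre : List Int) (a : Int) (t : List Int) :
    (pre ++ a :: t).getD pre.length 0 = a := by
  induction pre with
  | nil => rfl
  | cons x xs ih => simpa using ih

theorem pvSet_append (pre : List Int) (a x : Int) (t : List Int) :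
    (pre ++ a :: t).set pre.length x = pre ++ x :: t := by
  induction pre with
  | nil => rfl
  | cons y ys ih => simpa using ih

-- A's indexed sweep computes exactly B's structural sweep, relative to a
-- processed prefix `pre` the loop never touches again.
theorem pvSweep_eq_B (f : Nat) : ∀ (lst pre : List Int), 2 * lst.length ≤ f →
    pvSweep f (pre ++ lst) pre.length [] =
      (pre ++ (pvSweepB lst pre.length).1, (pvSweepB lst pre.length).2) := by
  induction f using Nat.strong_induction_on with
  | _ f ih =>
    intro lst pre hf
    match lst with
    | [] =>
      cases f with
      | zero => simp [pvSweep, pvSweepB]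
      | succ g => simp [pvSweep, pvSweepB]
    | [a] =>
      cases f with
      | zero => simp at hf
      | succ g =>
        have hcond : ¬ (pre.length < (pre ++ [a]).length - 1) := by
          simp [List.length_append]
        simp [pvSweep, pvSweepB, hcond]
    | a :: b :: rest =>
      have hf' : 2 * (rest.length + 2) ≤ f := by simpa using hf
      obtain ⟨g, rfl⟩ : ∃ g, f = g + 1 := ⟨f - 1, by omega⟩
      have hcond : pre.length < (pre ++ a :: b :: rest).length - 1 := by
        simp [List.length_append]
      have hga : (pre ++ a :: b :: rest).getD pre.length 0 = a := pvGetD_append pre a _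
      have hgb : (pre ++ a :: b :: rest).getD (pre.length + 1) 0 = b := by
        have hr : pre ++ a :: b :: rest = (pre ++ [a]) ++ b :: rest := by simp
        have hl : pre.length + 1 = (pre ++ [a]).length := by simp
        rw [hr, hl]
        exact pvGetD_append (pre ++ [a]) b rest
      by_cases hba : b < a
      · -- swap branch: two fuel units, the pair becomes b :: a, i stays
        have hlt : (pre ++ a :: b :: rest).getD (pre.length+1) 0 < (pre ++ a :: b :: rest).getD pre.length 0 := by
          rw [hga, hgb]; exact hba
        have hset : (( (pre ++ a :: b :: rest).set pre.length ((pre ++ a :: b :: rest).getD (pre.length+1) 0)).set (pre.length+1) ((pre ++ a :: b :: rest).getD pre.length 0)) = pre ++ b :: a :: rest := by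
          rw [hga, hgb, pvSet_append]
          have h1 : pre ++ b :: a :: rest = (pre ++ [b]) ++ a :: rest := by simp
          have h2 : pre ++ b :: b :: rest = (pre ++ [b]) ++ b :: rest := by simp
          have hl : pre.length + 1 = (pre ++ [b]).length := by simp
          rw [h1, h2, hl, pvSet_append]
        obtain ⟨h, rfl⟩ : ∃ h, g = h + 1 := ⟨g - 1, by omega⟩
        have hcond2 : pre.length < (pre ++ b :: a :: rest).length - 1 := by
          simp [List.length_append]
        have hga2 : (pre ++ b :: a :: rest).getD pre.length 0 = b := pvGetD_append pre b _
        have hgb2 : (pre ++ b :: a :: rest).getD (pre.length + 1) 0 = a := by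
          have hr : pre ++ b :: a :: rest = (pre ++ [b]) ++ a :: rest := by simp
          have hl : pre.length + 1 = (pre ++ [b]).length := by simp
          rw [hr, hl]
          exact pvGetD_append (pre ++ [b]) a rest
        have hnab : ¬ ((pre ++ b :: a :: rest).getD (pre.length+1) 0 < (pre ++ b :: a :: rest).getD pre.length 0) := by
          rw [hga2, hgb2]; omega
        have hrw : pre ++ b :: a :: rest = (pre ++ [b]) ++ a :: rest := by simp
        have hlb : pre.length + 1 = (pre ++ [b]).length := by simp
        have hih := ih h (by omega) (a :: rest) (pre ++ [b]) (by simp; omega)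
        rw [← hlb] at hih
        conv at hih => rw [show (pre ++ [b]) ++ a :: rest = pre ++ b :: a :: rest by simp]
        simp only [pvSweep, if_pos hcond, if_pos hlt, hset, if_pos hcond2, if_neg hnab]
        rw [pvSweep_acc, hih]
        simp only [pvSweepB, if_pos hba]
        simp
      · -- no-swap branch: one fuel unit, i advances, `a` joins the prefix
        have hnlt : ¬ ((pre ++ a :: b :: rest).getD (pre.length+1) 0 < (pre ++ a :: b :: rest).getD pre.length 0) := by
          rw [hga, hgb]; omega
        have hla : pre.length + 1 = (pre ++ [a]).length := by simp
        have hih := ih g (by omega) (b :: rest) (pre ++ [a]) (by simp; omega)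
        rw [← hla] at hih
        conv at hih => rw [show (pre ++ [a]) ++ b :: rest = pre ++ a :: b :: rest by simp]
        simp only [pvSweep, if_pos hcond, if_neg hnlt]
        rw [hih]
        simp only [pvSweepB, if_neg hba]
        simp

-- a pairwise-ordered list passes through B's sweep unchanged, with no token
theorem pvSweepB_of_pairwise (lst : List Int) :
    ∀ (i : Nat), lst.Pairwise (· ≤ ·) → pvSweepB lst i = (lst, []) := by
  induction lst with
  | nil => intro i _; simp [pvSweepB]
  | cons a t ih =>
    intro i h
    cases t with
    | nil => simp [pvSweepB]
    | cons b rest =>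
      rw [List.pairwise_cons] at h
      have hab : a ≤ b := h.1 b (by simp)
      have hnlt : ¬ b < a := by omega
      simp only [pvSweepB, if_neg hnlt, ih (i+1) h.2]

-- conversely: no token from B's sweep ⇒ unchanged and pairwise-ordered
theorem pvSweepB_nil (lst : List Int) :
    ∀ (i : Nat), (pvSweepB lst i).2 = [] →
      (pvSweepB lst i).1 = lst ∧ lst.Pairwise (· ≤ ·) := by
  induction lst with
  | nil => intro i _; exact ⟨by simp [pvSweepB], List.Pairwise.nil⟩
  | cons a t ih =>
    intro i h
    cases t with
    | nil => exact ⟨by simp [pvSweepB], by simp⟩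
    | cons b rest =>
      by_cases hba : b < a
      · exfalso
        simp [pvSweepB, if_pos hba] at h
      · simp only [pvSweepB, if_neg hba] at h ⊢
        obtain ⟨h1, h2⟩ := ih (i+1) h
        refine ⟨by simp [h1], ?_⟩
        have hforall := (List.pairwise_cons.mp h2).1
        refine List.pairwise_cons.mpr ⟨?_, h2⟩
        intro x hx
        rcases List.mem_cons.mp hx with rfl | hx'
        · omega
        · exact le_trans (by omega : a ≤ b) (hforall x hx')

-- sorted(lst) == lst  ⇔  B's sweep emits no token
theorem pvSorted_iff_sweepB_nil (lst : List Int) :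
    PySem.List.sorted lst (fun x => x) = lst ↔ (pvSweepB lst 0).2 = [] := by
  constructor
  · intro h
    have hp : lst.Pairwise (· ≤ ·) := by
      have := PySem.List.sorted_pairwise (xs := lst) (key := fun x => x)
      rwa [h] at this
    rw [pvSweepB_of_pairwise lst 0 hp]
  · intro h
    exact PySem.List.sorted_eq_self_of_pairwise lst (fun x => x) (pvSweepB_nil lst 0 h).2

-- the full A-sweep with its standard fuel is B's sweep
theorem pvSweepA_eq (cur : List Int) :
    pvSweep (2 * cur.length + 1) cur 0 [] = pvSweepB cur 0 := by
  have := pvSweep_eq_B (2 * cur.length + 1) cur [] (by omega)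
  simpa using this

-- main invariant: B's loop with accumulator acc computes A's recursion,
-- prefixed by acc's join, unless the sweep stops immediately
theorem pvGoB_eq (f : Nat) : ∀ (cur : List Int) (acc : List String),
    pvGoB (f+1) cur acc =
      if (pvSweepB cur 0).2 = [] then PySem.Str.join "," acc
      else if acc = [] then pvGoA f cur
      else PySem.Str.join "," acc ++ "," ++ pvGoA f cur := by
  induction f with
  | zero =>
    intro cur acc
    simp only [pvGoB, pvGoA, pvSweepA_eq]
    by_cases h : (pvSweepB cur 0).2 = []
    · simp [h]
    · simp only [if_neg h]
      by_cases hacc : acc = []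
      · simp [hacc]
      · simp only [if_neg hacc]
        exact pvJoin_append acc _ hacc h
  | succ f ih =>
    intro cur acc
    rw [show pvGoB (f+1+1) cur acc =
          (if (pvSweepB cur 0).2 = [] then PySem.Str.join "," acc
           else pvGoB (f+1) (pvSweepB cur 0).1 (acc ++ (pvSweepB cur 0).2)) from rfl]
    by_cases h : (pvSweepB cur 0).2 = []
    · simp [h]
    · simp only [if_neg h]
      rw [ih]
      have hgoA : pvGoA (f+1) cur =
          if PySem.List.sorted (pvSweepB cur 0).1 (fun x => x) = (pvSweepB cur 0).1
          then PySem.Str.join "," (pvSweepB cur 0).2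
          else PySem.Str.join "," (pvSweepB cur 0).2 ++ "," ++ pvGoA f (pvSweepB cur 0).1 := by
        simp only [pvGoA, pvSweepA_eq]
      by_cases hs : (pvSweepB (pvSweepB cur 0).1 0).2 = []
      · -- next sweep silent: r.1 sorted, A returns this pass's join
        have hsorted : PySem.List.sorted (pvSweepB cur 0).1 (fun x => x) = (pvSweepB cur 0).1 :=
          (pvSorted_iff_sweepB_nil _).mpr hs
        rw [hgoA, if_pos hsorted]
        simp only [if_pos hs]
        by_cases hacc : acc = []
        · simp [hacc]
        · simp only [if_neg hacc]
          exact pvJoin_append acc _ hacc h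
      · have hns : ¬ PySem.List.sorted (pvSweepB cur 0).1 (fun x => x) = (pvSweepB cur 0).1 := by
          intro hc; exact hs ((pvSorted_iff_sweepB_nil _).mp hc)
        rw [hgoA, if_neg hns]
        simp only [if_neg hs, if_neg (show ¬ acc ++ (pvSweepB cur 0).2 = [] by simp [h])]
        by_cases hacc : acc = []
        · subst hacc; simp
        · rw [pvJoin_append acc _ hacc h]
          simp only [if_neg hacc]
          simp [String.append_assoc]

-- ===== VERDICT (by name: the statement is the Claim_ definition above) =====
theorem swapsort_spec : Claim_equal_swapsort := by
  intro rods _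
  unfold Spec_swapsort swapsort swapsort_alt
  have h2 : rods.length * rods.length + 2 = (rods.length * rods.length + 1) + 1 := rfl
  rw [h2, pvGoB_eq]
  by_cases h : (pvSweepB rods 0).2 = []
  · -- already sorted: both sides are the empty join
    have hsorted : PySem.List.sorted rods (fun x => x) = rods :=
      (pvSorted_iff_sweepB_nil rods).mpr h
    simp only [if_pos h]
    have hfix : (pvSweepB rods 0).1 = rods := (pvSweepB_nil rods 0 h).1
    simp only [pvGoA, pvSweepA_eq, hfix, h, hsorted, if_pos]
  · simp [h]
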